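-- pv_equiv track=rewrite | github.com/nnlaaau/python-class | python-assignments/a4_300071088/a4_part1_300071088.py | create_clean_sorted_nodupicates_list
-- ===== SOURCE A (Python) =====
-- def clean_word(word):
--     """
--     (str)->str
--     Returns a new string which is lowercase version of the given word
--     with special characters and digits removed
--     """
--     clean = ''
--     excluding = '!.?:,"-_\()[]{}%123456789'+"'"
--     for wrd in word:
--         if wrd not in excluding:
--             clean += wrd
--     return clean.lower().strip()
--
-- def create_clean_sorted_nodupicates_list(s):
--     """
--     (str)->list of str
--     Given a string s representing a text, the function returns the list of words with the following properties:
--     - each word in the list is cleaned-up (no special characters nor numbers)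
--     - there are no duplicated words in the list, and
--     - the list is sorted lexicographicaly (you can use python's .sort() list method or sorted() function.)
--     """
--     new = []
--     s = clean_word(s).split()
--     for word in s:
--         if word not in new:
--             new.append(word)
--     new.sort()
--     return new
-- ===== SOURCE B (Python) =====
-- def clean_word(word):
--     excluding = '!.?:,"-_\()[]{}%123456789'+"'"
--     return ''.join(ch for ch in word if ch not in excluding).lower().strip()
--
-- def create_clean_sorted_nodupicates_list(s):
--     words = sorted(clean_word(s).split())
--     result = []
--     for word in words:
--         if not result or word != result[-1]:
--             result.append(word)
--     return result
-- ===== Notes on version B (the rewrite author's own statement) =====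
-- stated objective: alternative
-- what changed: Replaces A's whole-list membership dedup followed by a sort with sort-first then a single linear pass removing adjacent duplicates by comparing each word to the last appended element.
import Mathlib
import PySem

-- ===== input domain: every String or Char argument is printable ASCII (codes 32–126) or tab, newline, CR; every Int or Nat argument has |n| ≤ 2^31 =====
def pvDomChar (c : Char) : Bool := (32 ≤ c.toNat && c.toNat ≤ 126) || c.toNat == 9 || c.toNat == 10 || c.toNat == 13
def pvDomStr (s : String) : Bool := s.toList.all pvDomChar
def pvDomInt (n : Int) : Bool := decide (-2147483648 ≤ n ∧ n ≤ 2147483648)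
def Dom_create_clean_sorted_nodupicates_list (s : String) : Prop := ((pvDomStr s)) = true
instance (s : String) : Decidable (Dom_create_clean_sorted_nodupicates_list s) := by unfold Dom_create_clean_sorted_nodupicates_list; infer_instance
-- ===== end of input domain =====

-- B sorts first and removes adjacent duplicates in one linear pass instead of A's
-- whole-list membership dedup followed by a sort; return values are identical (objective: alternative).

-- ===== PORT A =====
-- the characters removed by clean_word ('!.?:,"-_\()[]{}%123456789' + "'")
def pvExcluding : List Char := "!.?:,\"-_\\()[]{}%123456789'".toList

def clean_word (word : String) : String :=
  -- clean = ''; for wrd in word: if wrd not in excluding: clean += wrd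
  PySem.Str.strip (PySem.Str.lower (String.mk
    (word.toList.foldl (fun acc c => if c ∉ pvExcluding then acc ++ [c] else acc) [])))

def create_clean_sorted_nodupicates_list (s : String) : List String :=
  PySem.List.sorted
    ((PySem.Str.split₀ (clean_word s)).foldl
      (fun new w => if w ∈ new then new else new ++ [w]) [])
    (fun x => x) false

-- ===== PORT B =====
def clean_word_alt (word : String) : String :=
  -- ''.join(ch for ch in word if ch not in excluding) = the filtered characters
  PySem.Str.strip (PySem.Str.lower
    (String.mk (word.toList.filter (fun c => decide (c ∉ pvExcluding)))))

def create_clean_sorted_nodupicates_list_alt (s : String) : List String :=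
  (PySem.List.sorted (PySem.Str.split₀ (clean_word_alt s)) (fun x => x) false).foldl
    (fun res w => if res = [] ∨ res.getLast? ≠ some w then res ++ [w] else res) []

-- ===== PRECONDITION & SPEC =====
def Spec_create_clean_sorted_nodupicates_list (s : String) (out : List String) : Prop := out = create_clean_sorted_nodupicates_list_alt s
instance (s : String) (out : List String) : Decidable (Spec_create_clean_sorted_nodupicates_list s out) := by unfold Spec_create_clean_sorted_nodupicates_list; infer_instance

-- ===== CLAIM (what is proved, stated in full; the proofs are below) =====
def Claim_equal_create_clean_sorted_nodupicates_list : Prop := ∀ (s : String), Dom_create_clean_sorted_nodupicates_list s → Spec_create_clean_sorted_nodupicates_list s (create_clean_sorted_nodupicates_list s)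

-- ===== LEMMAS AND PROOFS =====

-- the two cleaning helpers agree
theorem clean_word_alt_eq (w : String) : clean_word_alt w = clean_word w := by
  unfold clean_word clean_word_alt
  rw [PySem.List.foldl_append_ite_eq_filter, List.nil_append]

-- A's dedup loop: result is Nodup with exactly the members of acc ∪ ws
theorem dedup_fold (ws : List String) :
    ∀ acc : List String, acc.Nodup →
      (ws.foldl (fun new w => if w ∈ new then new else new ++ [w]) acc).Nodup ∧
      (∀ y, y ∈ ws.foldl (fun new w => if w ∈ new then new else new ++ [w]) acc ↔
        y ∈ acc ∨ y ∈ ws) := by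
  induction ws with
  | nil => intro acc h; simp [h]
  | cons w ws ih =>
    intro acc h
    by_cases hw : w ∈ acc
    · have this := ih acc h
      simp only [List.foldl_cons, if_pos hw]
      refine ⟨this.1, fun y => ?_⟩
      rw [this.2]
      simp only [List.mem_cons]
      constructor
      · rintro (hy | hy)
        · exact Or.inl hy
        · exact Or.inr (Or.inr hy)
      · rintro (hy | hy | hy)
        · exact Or.inl hy
        · subst hy; exact Or.inl hw
        · exact Or.inr hy
    · have hn : (acc ++ [w]).Nodup := by
        rw [List.nodup_append]
        refine ⟨h, List.nodup_singleton w, ?_⟩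
        intro a ha b hb
        rw [List.mem_singleton] at hb
        subst hb
        intro hEq
        exact hw (hEq ▸ ha)
      have this := ih (acc ++ [w]) hn
      simp only [List.foldl_cons, if_neg hw]
      refine ⟨this.1, fun y => ?_⟩
      rw [this.2]
      simp only [List.mem_append, List.mem_cons]
      tauto

-- in a strictly increasing list the last element is maximal
theorem le_getLast_of_pairwise_lt :
    ∀ (l : List String) (p : String), l.Pairwise (· < ·) → l.getLast? = some p →
      ∀ a ∈ l, a ≤ p := by
  intro l
  induction l with
  | nil => intro p _ hp; simp at hp
  | cons x xs ih =>
    intro p hpw hp a ha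
    rcases List.pairwise_cons.1 hpw with ⟨hx, hxs⟩
    cases xs with
    | nil =>
      simp at hp ha
      simp [ha, hp]
    | cons y ys =>
      rw [List.getLast?_cons_cons] at hp
      have hpmem : p ∈ y :: ys := List.mem_of_getLast? hp
      rcases List.mem_cons.1 ha with rfl | ha'
      · exact le_of_lt (hx p hpmem)
      · exact ih p hxs hp a ha'

-- B's adjacent-dedup loop over a ≤-sorted list: strictly increasing, members = acc ∪ t
theorem adj_fold (t : List String) :
    ∀ acc : List String, t.Pairwise (· ≤ ·) → acc.Pairwise (· < ·) →
      (∀ a ∈ acc, ∀ b ∈ t, a ≤ b) →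
      (t.foldl (fun res w => if res = [] ∨ res.getLast? ≠ some w then res ++ [w] else res) acc).Pairwise (· < ·) ∧
      (∀ y, y ∈ t.foldl (fun res w => if res = [] ∨ res.getLast? ≠ some w then res ++ [w] else res) acc ↔
        y ∈ acc ∨ y ∈ t) := by
  induction t with
  | nil => intro acc _ hacc _; exact ⟨hacc, by simp⟩
  | cons w t ih =>
    intro acc hts hacc hle
    rcases List.pairwise_cons.1 hts with ⟨hwle, hts'⟩
    by_cases hc : acc = [] ∨ acc.getLast? ≠ some w
    · -- append w
      have hacc' : (acc ++ [w]).Pairwise (· < ·) := by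
        rw [List.pairwise_append]
        refine ⟨hacc, List.pairwise_singleton _ _, ?_⟩
        intro a ha b hb
        rw [List.mem_singleton] at hb
        rw [hb]
        rcases hc with hnil | hne
        · rw [hnil] at ha; simp at ha
        · have hex : ∃ p, acc.getLast? = some p := by
            cases hgl : acc.getLast? with
            | none =>
              exact absurd (List.getLast?_eq_none_iff.1 hgl) (by rintro rfl; simp at ha)
            | some p => exact ⟨p, rfl⟩
          rcases hex with ⟨p, hp⟩
          have hap : a ≤ p := le_getLast_of_pairwise_lt acc p hacc hp a ha
          have hpw : p ≤ w := hle p (List.mem_of_getLast? hp) w (List.mem_cons_self ..)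
          have hpne : p ≠ w := fun hq => hne (by rw [hp, hq])
          exact lt_of_le_of_lt hap (lt_of_le_of_ne hpw hpne)
      have hle' : ∀ a ∈ acc ++ [w], ∀ b ∈ t, a ≤ b := by
        intro a ha b hb
        rcases List.mem_append.1 ha with ha' | ha'
        · exact hle a ha' b (List.mem_cons_of_mem _ hb)
        · rw [List.mem_singleton] at ha'; subst ha'; exact hwle b hb
      have this := ih (acc ++ [w]) hts' hacc' hle'
      simp only [List.foldl_cons, if_pos hc]
      refine ⟨this.1, fun y => ?_⟩
      rw [this.2]
      simp only [List.mem_append, List.mem_cons]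
      tauto
    · -- skip: acc ≠ [] and getLast? acc = some w, so w ∈ acc
      push_neg at hc
      have hwmem : w ∈ acc := List.mem_of_getLast? hc.2
      have hle' : ∀ a ∈ acc, ∀ b ∈ t, a ≤ b :=
        fun a ha b hb => hle a ha b (List.mem_cons_of_mem _ hb)
      have this := ih acc hts' hacc hle'
      have hcond : ¬ (acc = [] ∨ acc.getLast? ≠ some w) := by
        push_neg; exact hc
      simp only [List.foldl_cons, if_neg hcond]
      refine ⟨this.1, fun y => ?_⟩
      rw [this.2]
      simp only [List.mem_cons]
      constructor
      · rintro (hy | hy)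
        · exact Or.inl hy
        · exact Or.inr (Or.inr hy)
      · rintro (hy | hy | hy)
        · exact Or.inl hy
        · subst hy; exact Or.inl hwmem
        · exact Or.inr hy

-- ===== VERDICT (by name: the statement is the Claim_ definition above) =====
theorem create_clean_sorted_nodupicates_list_spec : Claim_equal_create_clean_sorted_nodupicates_list := by
  intro s _
  unfold Spec_create_clean_sorted_nodupicates_list
  unfold create_clean_sorted_nodupicates_list create_clean_sorted_nodupicates_list_alt
  rw [clean_word_alt_eq]
  generalize PySem.Str.split₀ (clean_word s) = ws
  have hts : (PySem.List.sorted ws (fun x => x) false).Pairwise (· ≤ ·) :=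
    (PySem.List.sorted_pairwise (xs := ws) (key := fun x => x)).imp (fun h => h)
  have hb := adj_fold (PySem.List.sorted ws (fun x => x) false) [] hts List.Pairwise.nil
    (by intro a ha; simp at ha)
  have hd := dedup_fold ws [] List.nodup_nil
  have hbnodup := hb.1.imp (fun {a b} h => ne_of_lt h)
  have hperm := (List.perm_ext_iff_of_nodup hbnodup hd.1).2 (fun y => by
    rw [hb.2 y, hd.2 y]
    simp [PySem.List.mem_sorted])
  exact PySem.List.sorted_eq_of_perm_of_pairwise_lt _ _ (fun x => x) hperm (hb.1.imp (fun h => h))
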